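-- pv_equiv track=rewrite | github.com/KirillNN/Python_Codewars | 7kyu/Set Reducer.py | set_reducer
-- ===== SOURCE A (Python) =====
-- def set_reducer(inp):
--     if len(inp) == 1:
--         return inp[0]
--     else:
--         res = [1] * len(inp)
--         index_res = 0
--         for i in range(len(inp[:-1])):
--             if inp[i] == inp[i + 1]:
--                 res[index_res] += 1
--                 res.pop()
--             else:
--                 index_res += 1
--
--         return set_reducer(res)
-- ===== SOURCE B (Python) =====
-- def set_reducer(inp):
--     # Iterative: repeatedly collapse the list to its run lengths until one value remains.
--     # Each pass builds (value, count) run pairs in one forward append pass.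
--     while len(inp) > 1:
--         runs = []
--         for x in inp:
--             if runs and runs[-1][0] == x:
--                 runs[-1][1] += 1
--             else:
--                 runs.append([x, 1])
--         inp = [c for _, c in runs]
--     return inp[0]
-- ===== Notes on version B (the rewrite author's own statement) =====
-- stated objective: idiomatic
-- what changed: A's recursion over a pre-filled list of ones mutated via an index pointer and pop() is replaced by an iterative while-loop whose pass builds (value, count) run pairs in one forward append pass and keeps the counts.
import Mathlib
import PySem

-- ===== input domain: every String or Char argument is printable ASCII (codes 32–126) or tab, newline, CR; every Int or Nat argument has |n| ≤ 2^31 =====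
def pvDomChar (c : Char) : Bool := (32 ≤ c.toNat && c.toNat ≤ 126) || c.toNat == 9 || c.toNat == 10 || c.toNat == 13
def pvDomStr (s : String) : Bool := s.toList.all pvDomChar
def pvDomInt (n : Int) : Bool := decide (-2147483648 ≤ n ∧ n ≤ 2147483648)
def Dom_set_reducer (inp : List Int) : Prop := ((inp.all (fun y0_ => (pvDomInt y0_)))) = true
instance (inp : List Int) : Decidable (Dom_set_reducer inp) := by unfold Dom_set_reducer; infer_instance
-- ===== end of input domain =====

-- B replaces A's recursion (pre-filled list of ones mutated via an index pointer and pop())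
-- by an iterative while-loop whose pass builds (value, count) run pairs in one forward
-- append pass and keeps the counts; objective: idiomatic.
-- Both Pythons raise on [] (A: RecursionError, B: IndexError).

-- ===== PORT A =====
-- Helpers below up to μrl_stepA_lt exist only for A's termination measure (cited by
-- decreasing_by); the mathematical content (run lengths) is shared by the proofs.

-- length of the prefix of t whose elements equal a
def countRun (a : Int) : List Int → Nat
  | [] => 0
  | b :: t => if b = a then countRun a t + 1 else 0

-- run lengths of consecutive equal values (proof-side characterisation)
def rleL : List Int → List Int
  | [] => []
  | a :: t =>
    ((countRun a t : Int) + 1) :: rleL (t.drop (countRun a t))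
termination_by l => l.length
decreasing_by simp

theorem rleL_nil : rleL [] = [] := by rw [rleL.eq_def]
theorem rleL_cons (a : Int) (t : List Int) :
    rleL (a :: t) = ((countRun a t : Int) + 1) :: rleL (t.drop (countRun a t)) := by
  rw [rleL.eq_def]
theorem rleL_singleton (a : Int) : rleL [a] = [1] := by
  rw [rleL_cons]; simp [countRun, rleL_nil]

-- whether some two adjacent elements are equal (used only in the termination measure)
def hasAdj : List Int → Bool
  | a :: b :: t => a = b || hasAdj (b :: t)
  | _ => false

-- termination measure for the repeated collapse
def μrl (l : List Int) : Nat := 2 * l.length + (if hasAdj l then 0 else 1)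

-- increment the head (effect of one equal pair on the run-length remainder)
def bump : List Int → List Int
  | [] => []
  | c :: r => (c + 1) :: r

theorem length_bump (w : List Int) : (bump w).length = w.length := by
  cases w <;> simp [bump]

theorem rleL_cons2 (a b : Int) (t : List Int) :
    rleL (a :: b :: t) = if a = b then bump (rleL (b :: t)) else 1 :: rleL (b :: t) := by
  by_cases h : a = b
  · subst h
    rw [rleL_cons, rleL_cons, if_pos rfl]
    have hc : countRun a (a :: t) = countRun a t + 1 := by simp [countRun]
    rw [hc]
    have hd : List.drop (countRun a t + 1) (a :: t) = List.drop (countRun a t) t := rfl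
    rw [hd]
    simp [bump]
  · rw [rleL_cons]
    have hc : countRun a (b :: t) = 0 := by
      have : countRun a (b :: t) = if b = a then countRun a t + 1 else 0 := rfl
      rw [this, if_neg (fun hba => h (Eq.symm hba))]
    rw [hc]
    simp only [if_neg h, List.drop_zero, Nat.cast_zero]
    rw [rleL_cons]
    norm_num

theorem rleL_ne_nil (l : List Int) (h : l ≠ []) : rleL l ≠ [] := by
  cases l with
  | nil => exact absurd rfl h
  | cons a t => rw [rleL_cons]; simp

theorem length_rleL_le (l : List Int) : (rleL l).length ≤ l.length := by
  induction l with
  | nil => simp [rleL_nil]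
  | cons a t ih =>
    cases t with
    | nil => simp [rleL_singleton]
    | cons b t' =>
      rw [rleL_cons2]
      split_ifs
      · rw [length_bump]
        simp only [List.length_cons] at *
        omega
      · simp only [List.length_cons] at *
        omega

theorem length_rleL_lt (l : List Int) (h : hasAdj l = true) : (rleL l).length < l.length := by
  induction l with
  | nil => simp [hasAdj] at h
  | cons a t ih =>
    cases t with
    | nil => simp [hasAdj] at h
    | cons b t' =>
      rw [rleL_cons2]
      rw [hasAdj] at h
      simp at h
      by_cases hab : a = b
      · rw [if_pos hab, length_bump]
        have hle := length_rleL_le (b :: t')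
        simp only [List.length_cons] at *
        omega
      · rcases h with h | h
        · exact absurd h hab
        · rw [if_neg hab]
          have := ih h
          simp only [List.length_cons] at *
          omega

theorem rleL_of_not_hasAdj (l : List Int) (h : hasAdj l = false) :
    rleL l = List.replicate l.length 1 := by
  induction l with
  | nil => simp [rleL_nil]
  | cons a t ih =>
    cases t with
    | nil => simp [rleL_singleton]
    | cons b t' =>
      rw [hasAdj] at h
      simp at h
      rw [rleL_cons2]
      simp [h.1, ih h.2, List.replicate]

theorem hasAdj_replicate_one (n : Nat) (h : 2 ≤ n) :
    hasAdj (List.replicate n (1 : Int)) = true := by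
  match n, h with
  | (m+2), _ => simp [List.replicate, hasAdj]

theorem μrl_rleL_lt (l : List Int) (h : 2 ≤ l.length) : μrl (rleL l) < μrl l := by
  by_cases ha : hasAdj l = true
  · have h1 := length_rleL_lt l ha
    have e1 : μrl l = 2 * l.length := by unfold μrl; rw [ha]; simp
    have e2 : μrl (rleL l) ≤ 2 * (rleL l).length + 1 := by unfold μrl; split_ifs <;> omega
    omega
  · simp only [Bool.not_eq_true] at ha
    have e1 : μrl l = 2 * l.length + 1 := by unfold μrl; rw [ha]; simp
    have e2 : μrl (rleL l) = 2 * l.length := by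
      unfold μrl
      rw [rleL_of_not_hasAdj l ha, hasAdj_replicate_one l.length h, List.length_replicate]
      simp
    omega

-- `counts[-1] += 1` : increment the LAST element
def bumpLast : List Int → List Int
  | [] => []
  | [c] => [c + 1]
  | c :: d :: r => c :: bumpLast (d :: r)

theorem bumpLast_cons (c : Int) (w : List Int) (h : w ≠ []) :
    bumpLast (c :: w) = c :: bumpLast w := by
  cases w with
  | nil => exact absurd rfl h
  | cons d r => rfl

theorem bump_bumpLast (w : List Int) (h : w ≠ []) :
    bump (bumpLast w) = bumpLast (bump w) := by
  match w with
  | [c] => simp [bump, bumpLast]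
  | c :: d :: r => simp [bump, bumpLast]

theorem bump_append_one (w : List Int) (h : w ≠ []) :
    bump (w ++ [1]) = bump w ++ [1] := by
  match w with
  | c :: r => simp [bump]

-- the key snoc equation for run lengths
theorem rleL_snoc (v : List Int) (x : Int) (hv : v ≠ []) :
    rleL (v ++ [x]) = if v.getLast hv = x then bumpLast (rleL v) else rleL v ++ [1] := by
  match v with
  | [a] =>
    by_cases h : a = x
    · subst h
      rw [List.getLast_singleton, if_pos rfl]
      show rleL [a, a] = bumpLast (rleL [a])
      rw [rleL_cons2, if_pos rfl, rleL_singleton]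
      rfl
    · rw [List.getLast_singleton, if_neg h]
      show rleL [a, x] = rleL [a] ++ [1]
      rw [rleL_cons2, if_neg h, rleL_singleton, rleL_singleton]
      rfl
  | a :: b :: t =>
    have hbt : (b :: t : List Int) ≠ [] := by simp
    have ih := rleL_snoc (b :: t) x hbt
    have hcons : (a :: b :: t) ++ [x] = a :: b :: (t ++ [x]) := by simp
    rw [hcons, rleL_cons2, ← List.cons_append, ih]
    have hlast : (a :: b :: t).getLast (by simp) = (b :: t).getLast hbt := by
      simp [List.getLast]
    rw [show ((a :: b :: t).getLast hv) = (b :: t).getLast hbt from hlast]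
    by_cases hab : a = b <;> by_cases hlx : (b :: t).getLast hbt = x
    · rw [if_pos hlx, if_pos hlx, if_pos hab, rleL_cons2, if_pos hab]
      exact bump_bumpLast _ (rleL_ne_nil _ hbt)
    · rw [if_neg hlx, if_neg hlx, if_pos hab, rleL_cons2, if_pos hab]
      exact bump_append_one _ (rleL_ne_nil _ hbt)
    · rw [if_pos hlx, if_pos hlx, if_neg hab, rleL_cons2, if_neg hab]
      rw [bumpLast_cons _ _ (rleL_ne_nil _ hbt)]
    · rw [if_neg hlx, if_neg hlx, if_neg hab, rleL_cons2, if_neg hab]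
      rfl

-- ===== A's port proper =====
-- one pass of A's for-loop: state (res, index_res); indices produced by range(len(inp)-1)
-- are in bounds, so getD is exact here
def stepA (inp : List Int) : List Int :=
  (List.foldl
    (fun (s : List Int × Nat) (i : Nat) =>
      if inp.getD i 0 = inp.getD (i + 1) 0 then
        ((s.1.set s.2 (s.1.getD s.2 0 + 1)).dropLast, s.2)
      else
        (s.1, s.2 + 1))
    (List.replicate inp.length (1 : Int), 0)
    (List.range (inp.length - 1))).1

theorem set_getD_append (u : List Int) (c : Int) (r : List Int) :
    ((u ++ c :: r).set u.length ((u ++ c :: r).getD u.length 0 + 1)) = u ++ (c + 1) :: r := by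
  induction u with
  | nil => simp
  | cons a u' ih =>
    simp only [List.cons_append, List.length_cons, List.set_cons_succ, List.getD,
      List.getElem?_cons_succ]
    simp only [List.getD] at ih
    rw [ih]

theorem dropLast_append_replicate (u : List Int) (k : Nat) (h : 1 ≤ k) :
    (u ++ List.replicate k (1 : Int)).dropLast = u ++ List.replicate (k - 1) (1 : Int) := by
  match k, h with
  | (m+1), _ =>
    have : List.replicate (m+1) (1:Int) = List.replicate m 1 ++ [1] := by
      rw [← List.replicate_succ']
    rw [this, ← List.append_assoc, List.dropLast_concat]
    simp

-- bumpLast written on u ++ [c] form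
theorem bumpLast_snoc (u : List Int) (c : Int) : bumpLast (u ++ [c]) = u ++ [c + 1] := by
  induction u with
  | nil => rfl
  | cons a u' ih =>
    cases u' with
    | nil => simp [bumpLast]
    | cons b w => simpa [bumpLast] using ih

-- loop invariant for A's pass: after folding range i (i ≤ n-1), res is the run lengths of
-- the first i+1 elements followed by padding ones, and index_res points at its last slot
theorem stepA_invariant (inp : List Int) (i : Nat) (hi : i ≤ inp.length - 1)
    (hne : inp ≠ []) :
    (List.foldl
      (fun (s : List Int × Nat) (j : Nat) =>
        if inp.getD j 0 = inp.getD (j + 1) 0 then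
          ((s.1.set s.2 (s.1.getD s.2 0 + 1)).dropLast, s.2)
        else
          (s.1, s.2 + 1))
      (List.replicate inp.length (1 : Int), 0)
      (List.range i)) =
    (rleL (inp.take (i+1)) ++ List.replicate (inp.length - 1 - i) (1 : Int),
     (rleL (inp.take (i+1))).length - 1) := by
  induction i with
  | zero =>
    cases inp with
    | nil => exact absurd rfl hne
    | cons a t =>
      simp [rleL_singleton, List.replicate_succ]
  | succ m ih =>
    have hm : m ≤ inp.length - 1 := by omega
    have hlen : m + 2 ≤ inp.length := by
      have : inp.length ≠ 0 := by simpa using List.length_pos_of_ne_nil hne |>.ne'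
      omega
    rw [List.range_succ, List.foldl_append, ih hm]
    simp only [List.foldl_cons, List.foldl_nil]
    -- the processed prefix and its last element
    have htake : inp.take (m + 1 + 1) = inp.take (m + 1) ++ [inp.getD (m + 1) 0] := by
      have h1 : inp.take (m + 1 + 1) = inp.take (m + 1) ++ (inp[m + 1]?).toList :=
        List.take_add_one
      have h2 : inp[m + 1]? = some (inp.getD (m + 1) 0) := by
        rw [List.getD_eq_getElem?_getD]
        cases h : inp[m + 1]? with
        | none =>
          rw [List.getElem?_eq_none_iff] at h
          omega
        | some v => simp
      rw [h1, h2]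
      rfl
    have htne : inp.take (m + 1) ≠ [] := by
      have hl : (inp.take (m + 1)).length = m + 1 := by
        rw [List.length_take]; omega
      intro hnil
      rw [hnil] at hl
      simp at hl
    have hlast : (inp.take (m + 1)).getLast htne = inp.getD m 0 := by
      rw [List.getLast_eq_getElem]
      have hl : (inp.take (m + 1)).length = m + 1 := by
        rw [List.length_take]; omega
      have hmlt : m < inp.length := by omega
      simp only [hl, Nat.add_sub_cancel]
      rw [List.getElem_take, List.getD_eq_getElem?_getD, List.getElem?_eq_getElem hmlt]
      rfl
    have hrne : rleL (inp.take (m + 1)) ≠ [] := rleL_ne_nil _ htne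
    obtain ⟨u, c, huc⟩ : ∃ u c, rleL (inp.take (m + 1)) = u ++ [c] := by
      rcases List.eq_nil_or_concat (rleL (inp.take (m + 1))) with h | ⟨u, c, h⟩
      · exact absurd h hrne
      · exact ⟨u, c, by simpa using h⟩
    have hsnoc := rleL_snoc (inp.take (m + 1)) (inp.getD (m + 1) 0) htne
    rw [hlast] at hsnoc
    have hones : 1 ≤ inp.length - 1 - m := by omega
    by_cases hcmp : inp.getD m 0 = inp.getD (m + 1) 0
    · -- equal pair: bump the last run length, pop a padding 1
      rw [if_pos hcmp, htake, hsnoc, if_pos hcmp, huc, bumpLast_snoc]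
      have hidx2 : (u ++ [c]).length - 1 = u.length := by simp
      rw [hidx2, List.append_assoc, List.singleton_append, set_getD_append]
      have h5 : u ++ (c + 1) :: List.replicate (inp.length - 1 - m) (1 : Int) =
          (u ++ [c + 1]) ++ List.replicate (inp.length - 1 - m) (1 : Int) := by simp
      rw [h5, dropLast_append_replicate _ _ hones]
      have h6 : inp.length - 1 - m - 1 = inp.length - 1 - (m + 1) := by omega
      rw [h6]
      simp
    · -- unequal pair: a fresh run of length 1 starts, index advances
      rw [if_neg hcmp, htake, hsnoc, if_neg hcmp, huc]
      have hrep : List.replicate (inp.length - 1 - m) (1 : Int) =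
          (1 : Int) :: List.replicate (inp.length - 1 - (m + 1)) 1 := by
        have h7 : inp.length - 1 - m = (inp.length - 1 - (m + 1)) + 1 := by omega
        rw [h7, List.replicate_succ]
      rw [hrep]
      simp

theorem stepA_eq_rleL (inp : List Int) (h : 2 ≤ inp.length) : stepA inp = rleL inp := by
  unfold stepA
  have hne : inp ≠ [] := by intro hnil; rw [hnil] at h; simp at h
  rw [stepA_invariant inp (inp.length - 1) (le_refl _) hne]
  have h1 : inp.length - 1 + 1 = inp.length := by omega
  rw [h1, List.take_length]
  simp

theorem μrl_stepA_lt (inp : List Int) (h : 2 ≤ inp.length) : μrl (stepA inp) < μrl inp := by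
  rw [stepA_eq_rleL inp h]; exact μrl_rleL_lt inp h

-- A: recursion; on [] Python A recurses forever (RecursionError) — that input is outside
-- Pre_set_reducer; the port returns 0 there only to be total.
def set_reducer (inp : List Int) : Int :=
  if inp.length = 1 then inp.headD 0
  else if inp.length ≤ 1 then 0
  else set_reducer (stepA inp)
termination_by μrl inp
decreasing_by exact μrl_stepA_lt inp (by omega)

-- ===== PORT B =====
-- one pass of B's for-loop: build (value, count) run pairs by a single forward append pass
-- (`runs[-1][1] += 1` = replace the last pair; `runs.append([x, 1])` = append)
def runsB (inp : List Int) : List (Int × Int) :=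
  inp.foldl
    (fun runs x =>
      match runs.getLast? with
      | some (v, c) => if v = x then runs.dropLast ++ [(v, c + 1)] else runs ++ [(x, 1)]
      | none => [(x, 1)])
    []

-- `inp = [c for _, c in runs]`
def passB (inp : List Int) : List Int := (runsB inp).map Prod.snd

-- B's while-loop, fuel-bounded for totality only (2*len+1 passes always suffice; proved
-- below via the μrl measure)
def loopB : Nat → List Int → List Int
  | 0, l => l
  | fuel + 1, l => if 1 < l.length then loopB fuel (passB l) else l

-- `return inp[0]`; on [] Python B raises IndexError — outside Pre_set_reducer; headD 0
-- only to be total.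
def set_reducer_alt (inp : List Int) : Int :=
  (loopB (2 * inp.length + 1) inp).headD 0

-- ===== PRECONDITION & SPEC =====
-- Pre_ excludes only the empty list, on which A raises RecursionError and B raises IndexError.
def Pre_set_reducer (inp : List Int) : Prop := inp ≠ []
instance (inp : List Int) : Decidable (Pre_set_reducer inp) := by unfold Pre_set_reducer; infer_instance
def pvWitness_set_reducer : List Int := [1, 1, 2]

def Spec_set_reducer (inp : List Int) (out : Int) : Prop := out = set_reducer_alt inp
instance (inp : List Int) (out : Int) : Decidable (Spec_set_reducer inp out) := by unfold Spec_set_reducer; infer_instance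

-- ===== CLAIM (what is proved, stated in full; the proofs are below) =====
def Claim_equal_set_reducer : Prop := ∀ (inp : List Int), Dom_set_reducer inp → Pre_set_reducer inp → Spec_set_reducer inp (set_reducer inp)

-- ===== LEMMAS AND PROOFS =====

theorem runsB_snoc (l : List Int) (x : Int) :
    runsB (l ++ [x]) =
      match (runsB l).getLast? with
      | some (v, c) => if v = x then (runsB l).dropLast ++ [(v, c + 1)] else runsB l ++ [(x, 1)]
      | none => [(x, 1)] := by
  unfold runsB
  rw [List.foldl_append]
  rfl

-- invariant of B's pass: the run pairs end with (last element, its run length) and their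
-- counts are exactly the run lengths
theorem runsB_inv (l : List Int) (h : l ≠ []) :
    ∃ u v c, runsB l = u ++ [(v, c)] ∧ l.getLast? = some v ∧
      (runsB l).map Prod.snd = rleL l := by
  induction l using List.reverseRecOn with
  | nil => exact absurd rfl h
  | append_singleton l x ih =>
    by_cases hl : l = []
    · subst hl
      refine ⟨[], x, 1, ?_, by simp, ?_⟩
      · rfl
      · show (runsB [x]).map Prod.snd = rleL [x]
        rw [rleL_singleton]; rfl
    · obtain ⟨u, v, c, hu, hv, hm⟩ := ih hl
      have hlastB : (runsB l).getLast? = some (v, c) := by rw [hu]; simp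
      have hlast : l.getLast hl = v := by
        have h2 := List.getLast?_eq_some_getLast hl
        rw [h2] at hv
        exact Option.some.inj hv
      have hstep : runsB (l ++ [x]) =
          if v = x then (runsB l).dropLast ++ [(v, c + 1)] else runsB l ++ [(x, 1)] := by
        rw [runsB_snoc, hlastB]
      have hsnoc := rleL_snoc l x hl
      rw [hlast] at hsnoc
      by_cases hvx : v = x
      · refine ⟨u, v, c + 1, ?_, ?_, ?_⟩
        · rw [hstep, if_pos hvx, hu, List.dropLast_concat]
        · simp [hvx]
        · rw [hstep, if_pos hvx, hu, List.dropLast_concat, hsnoc, if_pos hvx, ← hm, hu]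
          simp [bumpLast_snoc]
      · refine ⟨runsB l, x, 1, ?_, ?_, ?_⟩
        · rw [hstep, if_neg hvx]
        · simp
        · rw [hstep, if_neg hvx, hsnoc, if_neg hvx, ← hm]
          simp

theorem passB_eq_rleL (l : List Int) (h : l ≠ []) : passB l = rleL l := by
  obtain ⟨u, v, c, _, _, hm⟩ := runsB_inv l h
  exact hm

-- enough fuel makes B's loop compute exactly A's recursion
theorem loopB_headD (fuel : Nat) (l : List Int) (h : l ≠ []) (hf : μrl l ≤ fuel) :
    (loopB fuel l).headD 0 = set_reducer l := by
  induction fuel generalizing l with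
  | zero =>
    have : 1 ≤ l.length := List.length_pos_of_ne_nil h
    unfold μrl at hf
    omega
  | succ f ih =>
    have hpos : 1 ≤ l.length := List.length_pos_of_ne_nil h
    by_cases hlen : 1 < l.length
    · have h2 : 2 ≤ l.length := hlen
      have hlt := μrl_rleL_lt l h2
      rw [loopB, if_pos hlen, passB_eq_rleL l h,
          ih (rleL l) (rleL_ne_nil l h) (by omega)]
      conv_rhs => rw [set_reducer]
      rw [if_neg (by omega), if_neg (by omega), stepA_eq_rleL l h2]
    · have h1 : l.length = 1 := by omega
      rw [loopB, if_neg hlen, set_reducer, if_pos h1]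

theorem set_reducer_eq_alt (inp : List Int) (h : inp ≠ []) :
    set_reducer inp = set_reducer_alt inp := by
  unfold set_reducer_alt
  rw [loopB_headD (2 * inp.length + 1) inp h (by unfold μrl; split_ifs <;> omega)]

-- ===== VERDICT (by name: the statement is the Claim_ definition above) =====
theorem set_reducer_spec : Claim_equal_set_reducer := by
  intro inp _ hpre
  unfold Spec_set_reducer
  exact set_reducer_eq_alt inp hpre
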